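-- pv_equiv track=rewrite | github.com/collapseindex/umbra | umbra/multi.py | compute_consensus_al
-- ===== SOURCE A (Python) =====
-- def compute_consensus_al(agent_als: dict[str, int]) -> tuple[int, str]:
--     """Compute the effective authority level for a group of agents.
--
--     The weakest link determines the group's authority.
--
--     Args:
--         agent_als: Dict of {agent_name: current_al}.
--
--     Returns:
--         (effective_al, explanation) tuple.
--     """
--     if not agent_als:
--         return 4, "no agents in group"
--
--     effective = max(agent_als.values())  # Higher AL = less authority
--     weakest = [name for name, al in agent_als.items() if al == effective]
--
--     if len(weakest) == len(agent_als):
--         explanation = f"all agents at AL{effective}"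
--     else:
--         explanation = (
--             f"AL{effective} (limited by {', '.join(weakest)})"
--         )
--
--     return effective, explanation
-- ===== SOURCE B (Python) =====
-- def compute_consensus_al(agent_als: dict[str, int]) -> tuple[int, str]:
--     if not agent_als:
--         return 4, "no agents in group"
--
--     it = iter(agent_als.items())
--     name, al = next(it)
--     effective, weakest = al, [name]
--     for name, al in it:
--         if al > effective:
--             effective, weakest = al, [name]
--         elif al == effective:
--             weakest.append(name)
--
--     if len(weakest) == len(agent_als):
--         explanation = f"all agents at AL{effective}"
--     else:
--         explanation = f"AL{effective} (limited by {', '.join(weakest)})"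
--     return effective, explanation
-- ===== Notes on version B (the rewrite author's own statement) =====
-- stated objective: alternative
-- what changed: Replaces A's three passes (max over values, filter comprehension for the weakest names, length comparison) by one pass that maintains the running maximum and the list of names attaining it, resetting the list whenever a strictly larger value appears.
import Mathlib
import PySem

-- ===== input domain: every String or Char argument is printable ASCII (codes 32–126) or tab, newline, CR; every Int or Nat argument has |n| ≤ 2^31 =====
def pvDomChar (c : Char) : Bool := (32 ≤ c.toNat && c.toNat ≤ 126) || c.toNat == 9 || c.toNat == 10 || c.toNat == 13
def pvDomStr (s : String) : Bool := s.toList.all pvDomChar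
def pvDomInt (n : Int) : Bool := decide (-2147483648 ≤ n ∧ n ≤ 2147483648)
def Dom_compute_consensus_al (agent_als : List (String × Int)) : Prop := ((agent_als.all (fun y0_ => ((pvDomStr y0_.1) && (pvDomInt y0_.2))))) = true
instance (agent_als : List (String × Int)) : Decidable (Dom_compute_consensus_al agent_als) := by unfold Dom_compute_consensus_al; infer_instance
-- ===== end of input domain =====

-- B is a single pass maintaining the running maximum and its name list; A takes a max pass then a filter pass. Same cost; proved equal.

-- ===== PORT A =====
-- shared formatting of the two f-strings (identical text in Source A and Source B)
def ccFormat (effective : Int) (weakest : List String) (total : Nat) : Int × String :=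
  if weakest.length = total then
    (effective, "all agents at AL" ++ PySem.Int.toStr effective)
  else
    (effective, "AL" ++ PySem.Int.toStr effective ++ " (limited by " ++ PySem.Str.join ", " weakest ++ ")")

def compute_consensus_al (agent_als : List (String × Int)) : Int × String :=
  if agent_als = [] then (4, "no agents in group")
  else
    match PySem.List.max? (agent_als.map (·.2)) (fun y => y) with
    | none => (4, "no agents in group")   -- unreachable: the list is nonempty
    | some effective =>
      let weakest := (agent_als.filter (fun p => p.2 = effective)).map (·.1)
      ccFormat effective weakest agent_als.length

-- ===== PORT B =====
def ccLoop (e : Int) (ws : List String) (l : List (String × Int)) : Int × List String :=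
  match l with
  | [] => (e, ws)
  | (name, al) :: rest =>
    if e < al then ccLoop al [name] rest
    else if al = e then ccLoop e (ws ++ [name]) rest
    else ccLoop e ws rest

def compute_consensus_al_alt (agent_als : List (String × Int)) : Int × String :=
  match agent_als with
  | [] => (4, "no agents in group")
  | (n0, a0) :: rest =>
    let (effective, weakest) := ccLoop a0 [n0] rest
    ccFormat effective weakest agent_als.length

-- ===== PRECONDITION & SPEC =====
def Spec_compute_consensus_al (agent_als : List (String × Int)) (out : Int × String) : Prop := out = compute_consensus_al_alt agent_als
instance (agent_als : List (String × Int)) (out : Int × String) : Decidable (Spec_compute_consensus_al agent_als out) := by unfold Spec_compute_consensus_al; infer_instance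

-- ===== CLAIM (what is proved, stated in full; the proofs are below) =====
def Claim_equal_compute_consensus_al : Prop := ∀ (agent_als : List (String × Int)), Dom_compute_consensus_al agent_als → Spec_compute_consensus_al agent_als (compute_consensus_al agent_als)

-- ===== LEMMAS AND PROOFS =====

-- the running-max/name-list loop computes the fold-max and the filtered names
theorem ccLoop_spec (l : List (String × Int)) (e : Int) (ws : List String) :
    ccLoop e ws l =
      (l.foldl (fun a p => max a p.2) e,
       (if e = l.foldl (fun a p => max a p.2) e then ws else [])
         ++ (l.filter (fun p => p.2 = l.foldl (fun a p => max a p.2) e)).map (·.1)) := by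
  induction l generalizing e ws with
  | nil => simp [ccLoop]
  | cons hd tl ih =>
    obtain ⟨name, al⟩ := hd
    have hle : ∀ (a : Int), a ≤ tl.foldl (fun a p => max a p.2) a := by
      intro a
      have := (PySem.List.le_foldl_max (tl.map (·.2)) a).1
      simpa [List.foldl_map] using this
    simp only [ccLoop, List.foldl_cons, List.filter_cons]
    by_cases h1 : e < al
    · rw [if_pos h1, ih]
      have hmax : max e al = al := by omega
      have hne : ¬ (e = tl.foldl (fun a p => max a p.2) al) := by
        have := hle al; omega
      simp only [hmax, hne, ite_false]
      by_cases h2 : al = tl.foldl (fun a p => max a p.2) al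
      · simp [← h2, List.map_cons]
      · simp [h2]
    · rw [if_neg h1]
      by_cases h2 : al = e
      · rw [if_pos h2, ih]
        subst h2
        have hmax : max al al = al := max_self al
        simp only [hmax]
        by_cases h3 : al = tl.foldl (fun a p => max a p.2) al
        · simp [← h3]
        · simp [h3]
      · rw [if_neg h2, ih]
        have hmax : max e al = e := by omega
        have hne : ¬ ((al : Int) = tl.foldl (fun a p => max a p.2) e) := by
          have := hle e; omega
        simp [hmax, hne]

-- ===== VERDICT (by name: the statement is the Claim_ definition above) =====
theorem compute_consensus_al_spec : Claim_equal_compute_consensus_al := by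
  intro agent_als _
  show compute_consensus_al agent_als = compute_consensus_al_alt agent_als
  match agent_als with
  | [] => rfl
  | (n0, a0) :: rest =>
    simp only [compute_consensus_al, compute_consensus_al_alt, List.map_cons,
      PySem.List.max?_id_cons, List.foldl_map, ccLoop_spec]
    by_cases h : a0 = rest.foldl (fun a p => max a p.2) a0
    · simp [← h]
    · simp [h]
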